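-- pv_equiv track=rewrite | github.com/Rui-Cerqueira/PL2025-A104006 | TP1/WordScanner.py | word_scanner
-- ===== SOURCE A (Python) =====
-- def word_scanner(text: str):
--     reading_on = 0
--     conta_final = 0
--
--     i = 0
--     while i < len(text):
--         if text[i].lower() == 'o':
--             if i + 1 < len(text) and text[i+1].lower() == 'n':
--                 reading_on = 1
--                 i += 2
--             elif i + 2 < len(text) and text[i+1].lower() == 'f' and text[i+2].lower() == 'f':
--                 reading_on = 0
--                 i += 3
--             else:
--                 i += 1
--                 continue
--         else:
--             i += 1
--             continue
--
--         while reading_on == 1 and i < len(text):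
--             if text[i].isdigit():
--                 conta_final += int(text[i])
--                 i += 1
--             elif text[i] == '=':
--                 return conta_final
--             else:
--                 break
--
--     return conta_final
-- ===== SOURCE B (Python) =====
-- def word_scanner(text: str):
--     low = text.lower()
--     total = 0
--     pos = low.find('on')
--     while pos != -1:
--         j = pos + 2
--         while j < len(text) and text[j].isdigit():
--             total += int(text[j])
--             j += 1
--         if j < len(text) and text[j] == '=':
--             return total
--         pos = low.find('on', j)
--     return total
-- ===== Notes on version B (the rewrite author's own statement) =====
-- stated objective: faster
-- what changed: Replaced A's character-by-character state machine (reading_on flag with explicit off handling) by lowercasing the text once and jumping between markers with str.find, summing the digit run after each marker.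
import Mathlib
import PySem

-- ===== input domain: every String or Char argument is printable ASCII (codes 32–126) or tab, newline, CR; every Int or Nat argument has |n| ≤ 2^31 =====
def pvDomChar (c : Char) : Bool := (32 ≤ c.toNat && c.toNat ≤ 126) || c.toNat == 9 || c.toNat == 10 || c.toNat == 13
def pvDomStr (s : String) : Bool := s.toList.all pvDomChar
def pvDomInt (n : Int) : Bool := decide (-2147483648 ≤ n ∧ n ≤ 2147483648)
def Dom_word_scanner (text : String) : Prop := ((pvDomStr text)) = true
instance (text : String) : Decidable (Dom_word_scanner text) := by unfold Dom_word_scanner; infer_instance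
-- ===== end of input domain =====

-- B replaces A's character-by-character on/off state machine by a precomputed lowercase copy
-- and repeated str.find jumps between markers (same O(n); a timing run measured B faster).
-- Loops are ported with a fuel argument that only makes them total: each Python loop
-- strictly advances its index, so fuel length+1 is never exhausted.

-- ===== PORT A =====
-- inner `while reading_on == 1 and i < len(text)` loop: digits are summed, '=' returns
-- (Sum.inr), any other char breaks back to the outer loop (Sum.inl with the current j, acc)
def wsInner (cs : List Char) : Nat → Nat → Int → (Nat × Int) ⊕ Int
  | 0, j, acc => Sum.inl (j, acc)
  | fuel + 1, j, acc =>
    if j < cs.length then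
      if (cs.getD j ' ').isDigit then
        wsInner cs fuel (j + 1) (acc + (((cs.getD j ' ').toNat : Int) - 48))
      else if cs.getD j ' ' = '=' then Sum.inr acc
      else Sum.inl (j, acc)
    else Sum.inl (j, acc)

-- outer `while i < len(text)` loop of A (reading carries the reading_on flag)
def wsOuter (cs : List Char) : Nat → Nat → Int → Int → Int
  | 0, _, _, acc => acc
  | fuel + 1, i, reading, acc =>
    if i < cs.length then
      if (cs.getD i ' ').toLower = 'o' then
        if i + 1 < cs.length ∧ (cs.getD (i + 1) ' ').toLower = 'n' then
          match wsInner cs (cs.length + 1) (i + 2) acc with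
          | Sum.inr r => r
          | Sum.inl p => wsOuter cs fuel p.1 1 p.2
        else if i + 2 < cs.length ∧ (cs.getD (i + 1) ' ').toLower = 'f' ∧
            (cs.getD (i + 2) ' ').toLower = 'f' then
          wsOuter cs fuel (i + 3) 0 acc
        else wsOuter cs fuel (i + 1) reading acc
      else wsOuter cs fuel (i + 1) reading acc
    else acc

def word_scanner (text : String) : Int :=
  wsOuter text.toList (text.toList.length + 1) 0 0 0

-- ===== PORT B =====
-- low.find('on', pos)
def wsFind (low : List Char) : Nat → Nat → Option Nat
  | 0, _ => none
  | fuel + 1, pos =>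
    if pos + 1 < low.length then
      if low.getD pos ' ' = 'o' ∧ low.getD (pos + 1) ' ' = 'n' then some pos
      else wsFind low fuel (pos + 1)
    else none

-- the digit-summing inner while loop of B
def wsDigits (cs : List Char) : Nat → Nat → Int → Nat × Int
  | 0, j, acc => (j, acc)
  | fuel + 1, j, acc =>
    if j < cs.length ∧ (cs.getD j ' ').isDigit then
      wsDigits cs fuel (j + 1) (acc + (((cs.getD j ' ').toNat : Int) - 48))
    else (j, acc)

-- B's outer while loop: jump from one 'on' marker to the next with find
def wsLoop (cs low : List Char) : Nat → Nat → Int → Int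
  | 0, _, total => total
  | fuel + 1, pos, total =>
    match wsFind low (low.length + 1) pos with
    | none => total
    | some p =>
      let r := wsDigits cs (cs.length + 1) (p + 2) total
      if r.1 < cs.length ∧ cs.getD r.1 ' ' = '=' then r.2
      else wsLoop cs low fuel r.1 r.2

def word_scanner_alt (text : String) : Int :=
  let cs := text.toList
  wsLoop cs (cs.map Char.toLower) (cs.length + 1) 0 0

-- ===== PRECONDITION & SPEC =====
def Spec_word_scanner (text : String) (out : Int) : Prop := out = word_scanner_alt text
instance (text : String) (out : Int) : Decidable (Spec_word_scanner text out) := by unfold Spec_word_scanner; infer_instance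

-- ===== CLAIM (what is proved, stated in full; the proofs are below) =====
def Claim_equal_word_scanner : Prop := ∀ (text : String), Dom_word_scanner text → Spec_word_scanner text (word_scanner text)

-- ===== LEMMAS AND PROOFS =====

theorem wsDigits_ge (cs : List Char) (fuel j : Nat) (acc : Int) :
    j ≤ (wsDigits cs fuel j acc).1 := by
  induction fuel generalizing j acc with
  | zero => simp [wsDigits]
  | succ f ih =>
    rw [wsDigits]
    split_ifs with h
    · exact le_trans (Nat.le_succ j) (ih (j + 1) _)
    · exact le_refl j

theorem wsFind_some (low : List Char) (fuel pos p : Nat)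
    (h : wsFind low fuel pos = some p) : pos ≤ p ∧ p + 1 < low.length := by
  induction fuel generalizing pos with
  | zero => simp [wsFind] at h
  | succ f ih =>
    rw [wsFind] at h
    split_ifs at h with h1 h2
    · injection h with h'
      omega
    · have := ih (pos + 1) h; omega

theorem wsFind_none (low : List Char) (fuel pos : Nat) (h : ¬ pos + 1 < low.length) :
    wsFind low fuel pos = none := by
  cases fuel with
  | zero => rfl
  | succ f => rw [wsFind, if_neg h]

theorem wsFind_fuel (low : List Char) (f g pos : Nat)
    (hf : low.length ≤ pos + 1 + f) (hg : low.length ≤ pos + 1 + g) :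
    wsFind low f pos = wsFind low g pos := by
  induction f generalizing g pos with
  | zero =>
    rw [wsFind_none low 0 pos (by omega), wsFind_none low g pos (by omega)]
  | succ f ih =>
    by_cases hl : pos + 1 < low.length
    · cases g with
      | zero => omega
      | succ g =>
        rw [wsFind, wsFind, if_pos hl, if_pos hl]
        split_ifs with hm
        · rfl
        · exact ih g (pos + 1) (by omega) (by omega)
    · rw [wsFind_none low _ pos hl, wsFind_none low g pos hl]

theorem wsFind_step (low : List Char) (pos : Nat)
    (h : ¬ (pos + 1 < low.length ∧ low.getD pos ' ' = 'o' ∧ low.getD (pos + 1) ' ' = 'n')) :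
    wsFind low (low.length + 1) pos = wsFind low (low.length + 1) (pos + 1) := by
  by_cases hl : pos + 1 < low.length
  · rw [wsFind, if_pos hl, if_neg (by tauto)]
    exact wsFind_fuel low low.length (low.length + 1) (pos + 1) (by omega) (by omega)
  · rw [wsFind_none low _ pos hl, wsFind_none low _ (pos + 1) (by omega)]

-- A's inner loop is B's digit scan followed by the '=' test
theorem inner_to_digits (cs : List Char) (fuel j : Nat) (acc : Int)
    (hf : cs.length - j < fuel) :
    wsInner cs fuel j acc =
      (if (wsDigits cs fuel j acc).1 < cs.length ∧ cs.getD (wsDigits cs fuel j acc).1 ' ' = '='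
        then Sum.inr (wsDigits cs fuel j acc).2 else Sum.inl (wsDigits cs fuel j acc)) := by
  induction fuel generalizing j acc with
  | zero => omega
  | succ f ih =>
    by_cases hj : j < cs.length
    · by_cases hd : (cs.getD j ' ').isDigit
      · have hD : wsDigits cs (f + 1) j acc
            = wsDigits cs f (j + 1) (acc + (((cs.getD j ' ').toNat : Int) - 48)) := by
          rw [wsDigits, if_pos ⟨hj, hd⟩]
        rw [wsInner, if_pos hj, if_pos hd, hD]
        exact ih (j + 1) _ (by omega)
      · have hD : wsDigits cs (f + 1) j acc = (j, acc) := by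
          rw [wsDigits, if_neg (fun h => hd h.2)]
        by_cases he : cs.getD j ' ' = '='
        · rw [wsInner, if_pos hj, if_neg hd, if_pos he, hD, if_pos ⟨hj, he⟩]
        · rw [wsInner, if_pos hj, if_neg hd, if_neg he, hD, if_neg (fun h => he h.2)]
    · have hD : wsDigits cs (f + 1) j acc = (j, acc) := by
        rw [wsDigits, if_neg (fun h => hj h.1)]
      rw [wsInner, if_neg hj, hD, if_neg (fun h => hj h.1)]

theorem wsLoop_fuel (cs low : List Char) (f g pos : Nat) (t : Int)
    (hf : low.length - pos < f) (hg : low.length - pos < g) :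
    wsLoop cs low f pos t = wsLoop cs low g pos t := by
  induction f generalizing g pos t with
  | zero => omega
  | succ f ih =>
    cases g with
    | zero => omega
    | succ g =>
      rw [wsLoop, wsLoop]
      cases hfind : wsFind low (low.length + 1) pos with
      | none => rfl
      | some p =>
        have hp := wsFind_some low _ pos p hfind
        simp only
        split_ifs with he
        · rfl
        · have hge := wsDigits_ge cs (cs.length + 1) (p + 2) t
          exact ih g _ _ (by omega) (by omega)

theorem wsLoop_congr (cs low : List Char) (f g p q : Nat) (t : Int)
    (h : wsFind low (low.length + 1) p = wsFind low (low.length + 1) q)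
    (hf : low.length - p < f) (hg : low.length - q < g) :
    wsLoop cs low f p t = wsLoop cs low g q t := by
  cases f with
  | zero => omega
  | succ f =>
    cases g with
    | zero => omega
    | succ g =>
      rw [wsLoop, wsLoop, h]
      cases hfind : wsFind low (low.length + 1) q with
      | none => rfl
      | some pp =>
        have hp := wsFind_some low _ q pp hfind
        have hp' := wsFind_some low _ p pp (h.trans hfind)
        simp only
        split_ifs with he
        · rfl
        · have hge := wsDigits_ge cs (cs.length + 1) (pp + 2) t
          exact wsLoop_fuel cs low f g _ _ (by omega) (by omega)

theorem getD_low (cs : List Char) (i : Nat) (hi : i < cs.length) :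
    (cs.map Char.toLower).getD i ' ' = (cs.getD i ' ').toLower := by
  simp [List.getD_eq_getElem?_getD, List.getElem?_map, List.getElem?_eq_getElem hi]

theorem outer_eq_loop (cs : List Char) (fuel i : Nat) (r acc : Int)
    (hfuel : cs.length - i < fuel) :
    wsOuter cs fuel i r acc = wsLoop cs (cs.map Char.toLower) fuel i acc := by
  induction fuel generalizing i r acc with
  | zero => omega
  | succ f ih =>
    have hlen : (cs.map Char.toLower).length = cs.length := by simp
    by_cases hi : i < cs.length
    · by_cases hon : i + 1 < cs.length ∧ (cs.getD i ' ').toLower = 'o' ∧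
          (cs.getD (i + 1) ' ').toLower = 'n'
      · -- 'on' marker at i
        have hf : wsFind (cs.map Char.toLower) ((cs.map Char.toLower).length + 1) i
            = some i := by
          rw [wsFind, if_pos (by omega),
            if_pos ⟨by rw [getD_low cs i hi]; exact hon.2.1,
              by rw [getD_low cs (i + 1) hon.1]; exact hon.2.2⟩]
        rw [wsOuter, if_pos hi, if_pos hon.2.1, if_pos ⟨hon.1, hon.2.2⟩, wsLoop, hf]
        simp only
        have hd := inner_to_digits cs (cs.length + 1) (i + 2) acc (by omega)
        by_cases he : (wsDigits cs (cs.length + 1) (i + 2) acc).1 < cs.length ∧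
            cs.getD (wsDigits cs (cs.length + 1) (i + 2) acc).1 ' ' = '='
        · rw [if_pos he] at hd ⊢; rw [hd]
        · rw [if_neg he] at hd ⊢; rw [hd]
          have hge := wsDigits_ge cs (cs.length + 1) (i + 2) acc
          exact ih _ 1 _ (by omega)
      · -- no marker at i: A advances by 1 or 3, B's find skips position i (and i+1, i+2 for 'off')
        have hstep : wsFind (cs.map Char.toLower) ((cs.map Char.toLower).length + 1) i
            = wsFind (cs.map Char.toLower) ((cs.map Char.toLower).length + 1) (i + 1) := by
          apply wsFind_step
          intro ⟨h1, h2, h3⟩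
          rw [hlen] at h1
          exact hon ⟨h1, by rwa [getD_low cs i hi] at h2,
            by rwa [getD_low cs (i + 1) h1] at h3⟩
        by_cases ho : (cs.getD i ' ').toLower = 'o'
        · by_cases hn2 : i + 1 < cs.length ∧ (cs.getD (i + 1) ' ').toLower = 'n'
          · exact absurd ⟨hn2.1, ho, hn2.2⟩ hon
          · by_cases hoff : i + 2 < cs.length ∧ (cs.getD (i + 1) ' ').toLower = 'f' ∧
                (cs.getD (i + 2) ' ').toLower = 'f'
            · -- 'off': skip 3; the skipped chars lower to 'f' so find skips them too
              have hs2 : wsFind (cs.map Char.toLower) ((cs.map Char.toLower).length + 1) (i + 1)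
                  = wsFind (cs.map Char.toLower) ((cs.map Char.toLower).length + 1) (i + 2) := by
                apply wsFind_step
                intro ⟨_, h2, _⟩
                rw [getD_low cs (i + 1) (by omega), hoff.2.1] at h2
                exact absurd h2 (by decide)
              have hs3 : wsFind (cs.map Char.toLower) ((cs.map Char.toLower).length + 1) (i + 2)
                  = wsFind (cs.map Char.toLower) ((cs.map Char.toLower).length + 1) (i + 3) := by
                apply wsFind_step
                intro ⟨_, h2, _⟩
                rw [getD_low cs (i + 2) hoff.1, hoff.2.2] at h2
                exact absurd h2 (by decide)
              rw [wsOuter, if_pos hi, if_pos ho, if_neg (by tauto), if_pos hoff,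
                ih (i + 3) 0 acc (by omega)]
              exact wsLoop_congr cs (cs.map Char.toLower) f (f + 1) (i + 3) i acc
                (by rw [hstep, hs2, hs3]) (by omega) (by omega)
            · rw [wsOuter, if_pos hi, if_pos ho, if_neg (by tauto), if_neg hoff,
                ih (i + 1) r acc (by omega)]
              exact wsLoop_congr cs (cs.map Char.toLower) f (f + 1) (i + 1) i acc
                hstep.symm (by omega) (by omega)
        · rw [wsOuter, if_pos hi, if_neg ho, ih (i + 1) r acc (by omega)]
          exact wsLoop_congr cs (cs.map Char.toLower) f (f + 1) (i + 1) i acc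
            hstep.symm (by omega) (by omega)
    · rw [wsOuter, if_neg hi, wsLoop,
        wsFind_none (cs.map Char.toLower) _ i (by simp; omega)]

-- ===== VERDICT (by name: the statement is the Claim_ definition above) =====
theorem word_scanner_spec : Claim_equal_word_scanner := by
  intro text _
  unfold Spec_word_scanner word_scanner word_scanner_alt
  exact outer_eq_loop text.toList (text.toList.length + 1) 0 0 0 (by omega)
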